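-- pv_equiv track=rewrite | github.com/Jokten/Advent | 2021/23/part1.py | check_corr
-- ===== SOURCE A (Python) =====
-- def check_corr(corr, index):
--     indl = index+1
--     indr = index+2
--     possible = []
--     while True:
--         if corr[indl] == 0 and indl != -1:
--             possible.append(indl)
--             indl -= 1
--         else:
--             indl = -1
--         if indr != 7 and corr[indr] == 0:
--             possible.append(indr)
--             indr += 1
--         else:
--             indr = 7
--         if indl == -1 and indr == 7:
--             break
--     return possible
-- ===== SOURCE B (Python) =====
-- def _merge(lefts, rights):
--     if not lefts:
--         return rights
--     if not rights:
--         return lefts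
--     return [lefts[0], rights[0]] + _merge(lefts[1:], rights[1:])
--
--
-- def check_corr(corr, index):
--     lefts = []
--     i = index + 1
--     while i >= 0 and corr[i] == 0:
--         lefts.append(i)
--         i -= 1
--     rights = []
--     j = index + 2
--     while j != 7 and corr[j] == 0:
--         rights.append(j)
--         j += 1
--     return _merge(lefts, rights)
-- ===== Notes on version B (the rewrite author's own statement) =====
-- stated objective: alternative
-- what changed: A interleaves the left and right scans inside one stateful while-True loop with sentinel values -1/7; B runs two independent simple scans (left down, right up), then round-robin-merges the two result lists recursively.
-- outside the precondition, e.g. on check_corr([1, 0, 0, 0, 0, 0, 0], -4): A returns [-3, -2, -4, -1, -5, -6], B returns [-2, -1]; on check_corr([9, 0, 1], -3): A returns [-2], B returns []; on check_corr([1, 1, 1, 1, 1, 1, 1, 1, 0, 1], 6): A returns [8], B returns [8]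
import Mathlib
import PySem

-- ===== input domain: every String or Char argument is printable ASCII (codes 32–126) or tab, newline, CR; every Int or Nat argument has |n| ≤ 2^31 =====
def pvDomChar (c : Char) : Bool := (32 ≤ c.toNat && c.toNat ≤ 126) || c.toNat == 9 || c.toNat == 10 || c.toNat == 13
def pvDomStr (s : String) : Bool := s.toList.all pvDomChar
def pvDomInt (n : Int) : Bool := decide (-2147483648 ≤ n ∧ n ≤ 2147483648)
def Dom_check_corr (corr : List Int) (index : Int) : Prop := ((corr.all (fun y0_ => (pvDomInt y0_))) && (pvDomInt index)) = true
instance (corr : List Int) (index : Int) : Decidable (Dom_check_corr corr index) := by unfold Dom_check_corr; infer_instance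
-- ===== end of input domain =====

-- B replaces A's single stateful while-True loop (sentinels -1/7) by two independent scans
-- plus a recursive round-robin merge; same cost, different decomposition (objective: alternative).
-- Loops are ported with a fuel parameter as a totality guard only; under Pre_ the fuel
-- (corr.length + 20) is never exhausted, so each port computes exactly what its Python computes.

-- ===== PORT A =====
-- one iteration's first `if`: reads corr[indl] (a raise → none), returns (new indl, new possible)
def pv_lstep (corr : List Int) (indl : Int) (possible : List Int) : Option (Int × List Int) :=
  match PySem.List.pyGet? corr indl with
  | none => none
  | some vl => if vl = 0 ∧ indl ≠ -1 then some (indl - 1, possible ++ [indl]) else some (-1, possible)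

-- one iteration's second `if` (short-circuit: corr[indr] only read when indr ≠ 7)
def pv_rstep (corr : List Int) (indr : Int) (possible : List Int) : Option (Int × List Int) :=
  if indr = 7 then some (7, possible)
  else
    match PySem.List.pyGet? corr indr with
    | none => none
    | some vr => if vr = 0 then some (indr + 1, possible ++ [indr]) else some (7, possible)

-- the `while True:` loop; a `none` step is where Python raises IndexError (excluded by Pre_)
def check_corr_loop (corr : List Int) : Nat → Int → Int → List Int → List Int
  | 0, _, _, possible => possible
  | fuel + 1, indl, indr, possible =>
    match pv_lstep corr indl possible with
    | none => possible
    | some (indl', p1) =>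
      match pv_rstep corr indr p1 with
      | none => p1
      | some (indr', p2) =>
        if indl' = -1 ∧ indr' = 7 then p2
        else check_corr_loop corr fuel indl' indr' p2

def check_corr (corr : List Int) (index : Int) : List Int :=
  check_corr_loop corr (corr.length + 20) (index + 1) (index + 2) []

-- ===== PORT B =====
-- `while i >= 0 and corr[i] == 0:` (left scan); none = IndexError, outside Pre_
def pv_leftScan (corr : List Int) : Nat → Int → List Int → List Int
  | 0, _, lefts => lefts
  | fuel + 1, i, lefts =>
    if 0 ≤ i then
      match PySem.List.pyGet? corr i with
      | none => lefts
      | some v => if v = 0 then pv_leftScan corr fuel (i - 1) (lefts ++ [i]) else lefts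
    else lefts

-- `while j != 7 and corr[j] == 0:` (right scan)
def pv_rightScan (corr : List Int) : Nat → Int → List Int → List Int
  | 0, _, rights => rights
  | fuel + 1, j, rights =>
    if j = 7 then rights
    else
      match PySem.List.pyGet? corr j with
      | none => rights
      | some v => if v = 0 then pv_rightScan corr fuel (j + 1) (rights ++ [j]) else rights

-- `_merge`: round-robin merge ([l[0], r[0]] + _merge(l[1:], r[1:]))
def pv_merge : List Int → List Int → List Int
  | [], rights => rights
  | lefts, [] => lefts
  | x :: xs, y :: ys => x :: y :: pv_merge xs ys

def check_corr_alt (corr : List Int) (index : Int) : List Int :=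
  pv_merge (pv_leftScan corr (corr.length + 20) (index + 1) [])
           (pv_rightScan corr (corr.length + 20) (index + 2) [])

-- ===== PRECONDITION & SPEC =====
-- Pre_ = the inputs on which A returns without Python's negative-index wraparound: both scan
-- starts lie in [-1..7], the left start is inside the list, and the right scan meets a stop
-- (slot 7, or a nonzero cell before the end of the list) — otherwise A raises IndexError, or
-- (index ≤ -3) its left scan wraps around and appends accidental negative positions.
def Pre_check_corr (corr : List Int) (index : Int) : Prop :=
  1 ≤ corr.length ∧ -2 ≤ index ∧ index + 1 < (corr.length : Int) ∧ index + 2 ≤ 7 ∧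
    (index + 2 = 7 ∨ (index + 2 < (corr.length : Int) ∧
      (7 ≤ corr.length ∨ ∃ x ∈ corr.drop (index + 2).toNat, x ≠ 0)))
instance (corr : List Int) (index : Int) : Decidable (Pre_check_corr corr index) := by
  unfold Pre_check_corr; infer_instance

def pvWitness_check_corr : List Int × Int := ([0, 0, 0, 1, 0, 0, 0], 2)

def Spec_check_corr (corr : List Int) (index : Int) (out : List Int) : Prop := out = check_corr_alt corr index
instance (corr : List Int) (index : Int) (out : List Int) : Decidable (Spec_check_corr corr index out) := by unfold Spec_check_corr; infer_instance

-- ===== CLAIM (what is proved, stated in full; the proofs are below) =====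
def Claim_equal_check_corr : Prop := ∀ (corr : List Int) (index : Int), Dom_check_corr corr index → Pre_check_corr corr index → Spec_check_corr corr index (check_corr corr index)

-- ===== LEMMAS AND PROOFS =====

theorem pv_merge_nil_left (r : List Int) : pv_merge [] r = r := by cases r <;> rfl

theorem pv_merge_nil_right (l : List Int) : pv_merge l [] = l := by cases l <;> rfl

-- a read inside the hallway always succeeds
theorem pv_get_total (corr : List Int) (i : Int) (h1 : -(corr.length : Int) ≤ i)
    (h2 : i < corr.length) : ∃ v, PySem.List.pyGet? corr i = some v := by
  cases hg : PySem.List.pyGet? corr i with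
  | none =>
    have := (PySem.List.pyGet?_eq_none_iff (xs := corr) (i := i)).mp hg
    simp only [PySem.Raise.InRange] at this
    omega
  | some v => exact ⟨v, rfl⟩

-- the right-scan invariant survives a zero step
theorem pv_right_inv_step (corr : List Int) (indr : Int) (h0 : 0 ≤ indr) (h7 : ¬ indr = 7)
    (h4 : indr ≤ 7) (h5 : indr < (corr.length : Int))
    (h6 : 7 ≤ corr.length ∨ ∃ x ∈ corr.drop indr.toNat, x ≠ 0)
    (hvr : PySem.List.pyGet? corr indr = some 0) (hne : ¬ indr + 1 = 7) :
    indr + 1 < (corr.length : Int) ∧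
      (7 ≤ corr.length ∨ ∃ x ∈ corr.drop (indr + 1).toNat, x ≠ 0) := by
  rcases h6 with hbig | ⟨x, hx, hxne⟩
  · constructor
    · omega
    · exact Or.inl hbig
  · have hlt : indr.toNat < corr.length := by omega
    have hval : corr[indr.toNat] = 0 := by
      have h := PySem.List.pyGet?_eq_some_getElem corr h0 h5
      rw [hvr] at h
      exact (Option.some.inj h).symm
    rw [List.drop_eq_getElem_cons hlt] at hx
    rcases List.mem_cons.mp hx with hx1 | hx2
    · exact absurd (hx1.trans hval) hxne
    · have hnn : corr.drop (indr.toNat + 1) ≠ [] := List.ne_nil_of_mem hx2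
      have hlen2 : indr.toNat + 1 < corr.length := by
        by_contra hc
        exact hnn (List.drop_eq_nil_of_le (by omega))
      have htn : (indr + 1).toNat = indr.toNat + 1 := by omega
      refine ⟨by omega, Or.inr ⟨x, ?_, hxne⟩⟩
      rw [htn]
      exact hx2

-- accumulator laws for the two scans
theorem pv_leftScan_acc (corr : List Int) :
    ∀ (f : Nat) (i : Int) (acc : List Int),
      pv_leftScan corr f i acc = acc ++ pv_leftScan corr f i [] := by
  intro f
  induction f with
  | zero => intro i acc; simp [pv_leftScan]
  | succ m ih =>
    intro i acc
    by_cases hi : 0 ≤ i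
    · cases hg : PySem.List.pyGet? corr i with
      | none => simp [pv_leftScan, hi, hg]
      | some v =>
        by_cases hv : v = 0
        · simp only [pv_leftScan, hi, if_pos, hg, hv, reduceIte]
          rw [ih (i - 1) (acc ++ [i]), ih (i - 1) ([] ++ [i])]
          simp
        · simp [pv_leftScan, hi, hg, hv]
    · simp [pv_leftScan, hi]

theorem pv_rightScan_acc (corr : List Int) :
    ∀ (f : Nat) (j : Int) (acc : List Int),
      pv_rightScan corr f j acc = acc ++ pv_rightScan corr f j [] := by
  intro f
  induction f with
  | zero => intro j acc; simp [pv_rightScan]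
  | succ m ih =>
    intro j acc
    by_cases h7 : j = 7
    · simp [pv_rightScan, h7]
    · cases hg : PySem.List.pyGet? corr j with
      | none => simp [pv_rightScan, h7, hg]
      | some v =>
        by_cases hv : v = 0
        · simp only [pv_rightScan, h7, reduceIte, hg, hv]
          rw [ih (j + 1) (acc ++ [j]), ih (j + 1) ([] ++ [j])]
          simp
        · simp [pv_rightScan, h7, hg, hv]

-- with enough fuel the scans do not depend on the fuel
theorem pv_leftScan_stable (corr : List Int) :
    ∀ (f g : Nat) (i : Int) (acc : List Int), (i + 1).toNat < f → (i + 1).toNat < g →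
      pv_leftScan corr f i acc = pv_leftScan corr g i acc := by
  intro f
  induction f with
  | zero => intro g i acc hf; omega
  | succ m ih =>
    intro g i acc hf hg
    cases g with
    | zero => omega
    | succ k =>
      by_cases hi : 0 ≤ i
      · cases hget : PySem.List.pyGet? corr i with
        | none => simp [pv_leftScan, hi, hget]
        | some v =>
          by_cases hv : v = 0
          · simp only [pv_leftScan, hi, if_pos, hget, hv, reduceIte]
            exact ih k (i - 1) (acc ++ [i]) (by omega) (by omega)
          · simp [pv_leftScan, hi, hget, hv]
      · simp [pv_leftScan, hi]

theorem pv_rightScan_stable (corr : List Int) :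
    ∀ (f g : Nat) (j : Int) (acc : List Int), j ≤ 7 → (7 - j).toNat < f → (7 - j).toNat < g →
      pv_rightScan corr f j acc = pv_rightScan corr g j acc := by
  intro f
  induction f with
  | zero => intro g j acc h7 hf; omega
  | succ m ih =>
    intro g j acc hle hf hg
    cases g with
    | zero => omega
    | succ k =>
      by_cases h7 : j = 7
      · simp [pv_rightScan, h7]
      · cases hget : PySem.List.pyGet? corr j with
        | none => simp [pv_rightScan, h7, hget]
        | some v =>
          by_cases hv : v = 0
          · simp only [pv_rightScan, h7, reduceIte, hget, hv]
            exact ih k (j + 1) (acc ++ [j]) (by omega) (by omega) (by omega)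
          · simp [pv_rightScan, h7, hget, hv]

-- shapes of B's scans, used to mirror A's four loop branches
theorem pv_leftScan_nil_of_neg (corr : List Int) (f : Nat) (i : Int) (hi : ¬ 0 ≤ i) :
    pv_leftScan corr f i [] = [] := by
  cases f with
  | zero => rfl
  | succ m => simp [pv_leftScan, hi]

theorem pv_leftScan_nil_of_nonzero (corr : List Int) (f : Nat) (i v : Int) (hi : 0 ≤ i)
    (hg : PySem.List.pyGet? corr i = some v) (hv : ¬ v = 0) :
    pv_leftScan corr f i [] = [] := by
  cases f with
  | zero => rfl
  | succ m => simp [pv_leftScan, hi, hg, hv]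

theorem pv_leftScan_cons (corr : List Int) (f : Nat) (i : Int) (hi : 0 ≤ i)
    (hf : (i + 1).toNat < f) (hg : PySem.List.pyGet? corr i = some 0) :
    pv_leftScan corr f i [] = i :: pv_leftScan corr f (i - 1) [] := by
  cases f with
  | zero => omega
  | succ m =>
    have h1 : pv_leftScan corr (m + 1) i [] = pv_leftScan corr m (i - 1) ([] ++ [i]) := by
      simp [pv_leftScan, hi, hg]
    rw [h1, pv_leftScan_acc corr m (i - 1) ([] ++ [i])]
    rw [pv_leftScan_stable corr m (m + 1) (i - 1) [] (by omega) (by omega)]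
    simp

theorem pv_rightScan_nil_of_seven (corr : List Int) (f : Nat) (acc : List Int) :
    pv_rightScan corr f 7 acc = acc := by
  cases f with
  | zero => rfl
  | succ m => simp [pv_rightScan]

theorem pv_rightScan_nil_of_nonzero (corr : List Int) (f : Nat) (j v : Int) (h7 : ¬ j = 7)
    (hg : PySem.List.pyGet? corr j = some v) (hv : ¬ v = 0) :
    pv_rightScan corr f j [] = [] := by
  cases f with
  | zero => rfl
  | succ m => simp [pv_rightScan, h7, hg, hv]

theorem pv_rightScan_cons (corr : List Int) (f : Nat) (j : Int) (h7 : ¬ j = 7) (hle : j ≤ 7)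
    (hf : (7 - j).toNat < f) (hg : PySem.List.pyGet? corr j = some 0) :
    pv_rightScan corr f j [] = j :: pv_rightScan corr f (j + 1) [] := by
  cases f with
  | zero => omega
  | succ m =>
    have h1 : pv_rightScan corr (m + 1) j [] = pv_rightScan corr m (j + 1) ([] ++ [j]) := by
      simp [pv_rightScan, h7, hg]
    rw [h1, pv_rightScan_acc corr m (j + 1) ([] ++ [j])]
    rw [pv_rightScan_stable corr m (m + 1) (j + 1) [] (by omega) (by omega) (by omega)]
    simp

-- the invariant: A's loop produces the round-robin merge of the two scans
theorem check_corr_loop_eq (corr : List Int) (hpos : 1 ≤ corr.length) :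
    ∀ (F : Nat) (indl indr : Int) (acc : List Int),
      -1 ≤ indl → indl < corr.length → 0 ≤ indr → indr ≤ 7 →
      (indr = 7 ∨ indr < (corr.length : Int)) →
      (indr = 7 ∨ 7 ≤ corr.length ∨ ∃ x ∈ corr.drop indr.toNat, x ≠ 0) →
      (indl + 1).toNat + (7 - indr).toNat < F →
      check_corr_loop corr F indl indr acc
        = acc ++ pv_merge (pv_leftScan corr F indl []) (pv_rightScan corr F indr []) := by
  intro F
  induction F with
  | zero => intro indl indr acc h1 h2 h3 h4 h5 h6 hn; omega
  | succ m ih =>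
    intro indl indr acc h1 h2 h3 h4 h5 h6 hn
    obtain ⟨vl, hvl⟩ := pv_get_total corr indl (by omega) h2
    by_cases hL : vl = 0 ∧ ¬ indl = -1
    · -- left appends indl and moves down
      have hl0 : 0 ≤ indl := by omega
      have hLs : pv_lstep corr indl acc = some (indl - 1, acc ++ [indl]) := by
        simp [pv_lstep, hvl, hL.1, hL.2]
      by_cases h7 : indr = 7
      · subst h7
        have hRs : pv_rstep corr 7 (acc ++ [indl]) = some (7, acc ++ [indl]) := by
          simp [pv_rstep]
        simp only [check_corr_loop, hLs, hRs]
        rw [pv_leftScan_cons corr (m + 1) indl hl0 (by omega) (hL.1 ▸ hvl)]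
        rw [pv_rightScan_nil_of_seven, pv_merge_nil_right]
        by_cases hbreak : indl - 1 = -1
        · rw [if_pos ⟨hbreak, trivial⟩]
          rw [pv_leftScan_nil_of_neg corr (m + 1) (indl - 1) (by omega)]
        · rw [if_neg (by tauto)]
          rw [ih (indl - 1) 7 (acc ++ [indl]) (by omega) (by omega) (by omega) (by omega)
                (Or.inl rfl) (Or.inl rfl) (by omega)]
          rw [pv_rightScan_nil_of_seven, pv_merge_nil_right]
          rw [pv_leftScan_stable corr m (m + 1) (indl - 1) [] (by omega) (by omega)]
          simp
      · have h5r : indr < (corr.length : Int) := h5.resolve_left h7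
        have h6r : 7 ≤ corr.length ∨ ∃ x ∈ corr.drop indr.toNat, x ≠ 0 := h6.resolve_left h7
        obtain ⟨vr, hvr⟩ := pv_get_total corr indr (by omega) h5r
        by_cases hR : vr = 0
        · have hq1 : (indl + 1).toNat < m + 1 := by clear h6 h6r; omega
          have hq2 : (7 - indr).toNat < m + 1 := by clear h6 h6r; omega
          have hq3 : -1 ≤ indl - 1 := by clear h6 h6r; omega
          have hq4 : indl - 1 < (corr.length : Int) := by clear h6 h6r; omega
          have hq5 : 0 ≤ indr + 1 := by clear h6 h6r; omega
          have hq6 : indr + 1 ≤ 7 := by clear h6 h6r; omega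
          have hq7 : (indl - 1 + 1).toNat + (7 - (indr + 1)).toNat < m := by clear h6 h6r; omega
          have hq8 : (indl - 1 + 1).toNat < m := by clear h6 h6r; omega
          have hq9 : (indl - 1 + 1).toNat < m + 1 := by clear h6 h6r; omega
          have hq10 : (7 - (indr + 1)).toNat < m := by clear h6 h6r; omega
          have hq11 : (7 - (indr + 1)).toNat < m + 1 := by clear h6 h6r; omega
          have hstep : (indr + 1 = 7 ∨ indr + 1 < (corr.length : Int)) ∧
              (indr + 1 = 7 ∨ 7 ≤ corr.length ∨ ∃ x ∈ corr.drop (indr + 1).toNat, x ≠ 0) := by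
            by_cases hr7 : indr + 1 = 7
            · exact ⟨Or.inl hr7, Or.inl hr7⟩
            · obtain ⟨a, b⟩ := pv_right_inv_step corr indr h3 h7 h4 h5r h6r (hR ▸ hvr) hr7
              exact ⟨Or.inr a, Or.inr b⟩
          have hRs : pv_rstep corr indr (acc ++ [indl])
              = some (indr + 1, acc ++ [indl] ++ [indr]) := by
            simp [pv_rstep, h7, hvr, hR]
          simp only [check_corr_loop, hLs, hRs]
          rw [pv_leftScan_cons corr (m + 1) indl hl0 hq1 (hL.1 ▸ hvl)]
          rw [pv_rightScan_cons corr (m + 1) indr h7 h4 hq2 (hR ▸ hvr)]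
          by_cases hbreak : indl - 1 = -1 ∧ indr + 1 = 7
          · rw [if_pos hbreak]
            rw [pv_leftScan_nil_of_neg corr (m + 1) (indl - 1) (by omega)]
            rw [hbreak.2, pv_rightScan_nil_of_seven]
            simp [pv_merge]
          · rw [if_neg hbreak]
            rw [ih (indl - 1) (indr + 1) (acc ++ [indl] ++ [indr]) hq3 hq4
                  hq5 hq6 hstep.1 hstep.2 hq7]
            rw [pv_leftScan_stable corr m (m + 1) (indl - 1) [] hq8 hq9]
            rw [pv_rightScan_stable corr m (m + 1) (indr + 1) [] hq6 hq10 hq11]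
            simp [pv_merge]
        · have hRs : pv_rstep corr indr (acc ++ [indl]) = some (7, acc ++ [indl]) := by
            simp [pv_rstep, h7, hvr, hR]
          simp only [check_corr_loop, hLs, hRs]
          rw [pv_leftScan_cons corr (m + 1) indl hl0 (by clear h6 h6r; omega) (hL.1 ▸ hvl)]
          rw [pv_rightScan_nil_of_nonzero corr (m + 1) indr vr h7 hvr hR, pv_merge_nil_right]
          by_cases hbreak : indl - 1 = -1
          · rw [if_pos ⟨hbreak, trivial⟩]
            rw [pv_leftScan_nil_of_neg corr (m + 1) (indl - 1) (by clear h6 h6r; omega)]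
          · rw [if_neg (by tauto)]
            rw [ih (indl - 1) 7 (acc ++ [indl]) (by clear h6 h6r; omega) (by clear h6 h6r; omega) (by clear h6 h6r; omega) (by clear h6 h6r; omega)
                  (Or.inl rfl) (Or.inl rfl) (by clear h6 h6r; omega)]
            rw [pv_rightScan_nil_of_seven, pv_merge_nil_right]
            rw [pv_leftScan_stable corr m (m + 1) (indl - 1) [] (by clear h6 h6r; omega) (by clear h6 h6r; omega)]
            simp
    · -- left side is finished: indl := -1, nothing appended
      have hLs : pv_lstep corr indl acc = some (-1, acc) := by
        simp only [pv_lstep, hvl]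
        rw [if_neg (show ¬ (vl = 0 ∧ indl ≠ -1) by tauto)]
      have hLlist : pv_leftScan corr (m + 1) indl [] = [] := by
        by_cases hl0 : 0 ≤ indl
        · have hvl0 : ¬ vl = 0 := fun h0 => hL ⟨h0, by omega⟩
          exact pv_leftScan_nil_of_nonzero corr (m + 1) indl vl hl0 hvl hvl0
        · exact pv_leftScan_nil_of_neg corr (m + 1) indl hl0
      by_cases h7 : indr = 7
      · subst h7
        have hRs : pv_rstep corr 7 acc = some (7, acc) := by simp [pv_rstep]
        simp only [check_corr_loop, hLs, hRs]
        rw [if_pos ⟨trivial, trivial⟩, hLlist, pv_rightScan_nil_of_seven]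
        simp [pv_merge]
      · have h5r : indr < (corr.length : Int) := h5.resolve_left h7
        have h6r : 7 ≤ corr.length ∨ ∃ x ∈ corr.drop indr.toNat, x ≠ 0 := h6.resolve_left h7
        obtain ⟨vr, hvr⟩ := pv_get_total corr indr (by omega) h5r
        by_cases hR : vr = 0
        · have hq2 : (7 - indr).toNat < m + 1 := by clear h6 h6r; omega
          have hq5 : 0 ≤ indr + 1 := by clear h6 h6r; omega
          have hq6 : indr + 1 ≤ 7 := by clear h6 h6r; omega
          have hq7 : ((-1 : Int) + 1).toNat + (7 - (indr + 1)).toNat < m := by clear h6 h6r; omega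
          have hq10 : (7 - (indr + 1)).toNat < m := by clear h6 h6r; omega
          have hq11 : (7 - (indr + 1)).toNat < m + 1 := by clear h6 h6r; omega
          have hstep : (indr + 1 = 7 ∨ indr + 1 < (corr.length : Int)) ∧
              (indr + 1 = 7 ∨ 7 ≤ corr.length ∨ ∃ x ∈ corr.drop (indr + 1).toNat, x ≠ 0) := by
            by_cases hr7 : indr + 1 = 7
            · exact ⟨Or.inl hr7, Or.inl hr7⟩
            · obtain ⟨a, b⟩ := pv_right_inv_step corr indr h3 h7 h4 h5r h6r (hR ▸ hvr) hr7
              exact ⟨Or.inr a, Or.inr b⟩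
          have hRs : pv_rstep corr indr acc = some (indr + 1, acc ++ [indr]) := by
            simp [pv_rstep, h7, hvr, hR]
          simp only [check_corr_loop, hLs, hRs]
          rw [hLlist, pv_rightScan_cons corr (m + 1) indr h7 h4 hq2 (hR ▸ hvr)]
          rw [pv_merge_nil_left]
          by_cases hbreak : indr + 1 = 7
          · rw [if_pos ⟨trivial, hbreak⟩]
            rw [hbreak, pv_rightScan_nil_of_seven]
          · rw [if_neg (by tauto)]
            rw [ih (-1) (indr + 1) (acc ++ [indr]) (by clear h6 h6r hstep; omega) (by clear h6 h6r hstep; omega) hq5 hq6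
                  hstep.1 hstep.2 hq7]
            rw [pv_leftScan_nil_of_neg corr m (-1) (by clear h6 h6r hstep; omega), pv_merge_nil_left]
            rw [pv_rightScan_stable corr m (m + 1) (indr + 1) [] hq6 hq10 hq11]
            simp
        · have hRs : pv_rstep corr indr acc = some (7, acc) := by
            simp [pv_rstep, h7, hvr, hR]
          simp only [check_corr_loop, hLs, hRs]
          rw [if_pos ⟨trivial, trivial⟩, hLlist]
          rw [pv_rightScan_nil_of_nonzero corr (m + 1) indr vr h7 hvr hR]
          simp [pv_merge]

-- ===== VERDICT (by name: the statement is the Claim_ definition above) =====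
theorem check_corr_spec : Claim_equal_check_corr := by
  intro corr index _hdom hpre
  obtain ⟨hpos, hlo, hlt, hhi, hstop⟩ := hpre
  unfold Spec_check_corr check_corr check_corr_alt
  refine check_corr_loop_eq corr hpos (corr.length + 20) (index + 1) (index + 2) []
    (by omega) (by omega) (by omega) (by omega) ?_ ?_ (by omega)
  · rcases hstop with h | ⟨h, _⟩
    · exact Or.inl h
    · exact Or.inr h
  · rcases hstop with h | ⟨_, h⟩
    · exact Or.inl h
    · exact Or.inr h
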